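-- pv_equiv track=rewrite | github.com/bardulah/Hiring-Job-Description-Generator | src/analyzers/nlp_analyzer.py | _aggregate_salary_data
-- ===== SOURCE A (Python) =====
-- from typing import Dict, List, Any, Set, Tuple, Optional
--
-- def _aggregate_salary_data(salary_ranges: List[Dict[str, Any]]) -> Dict[str, Any]:
--     """Aggregate salary data from multiple sources."""
--     if not salary_ranges:
--         return {}
--
--     min_salaries = [s['min'] for s in salary_ranges if 'min' in s]
--     max_salaries = [s['max'] for s in salary_ranges if 'max' in s]
--
--     if not min_salaries:
--         return {}
--
--     return {
--         'market_min': min(min_salaries),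
--         'market_max': max(max_salaries),
--         'average_min': sum(min_salaries) // len(min_salaries),
--         'average_max': sum(max_salaries) // len(max_salaries) if max_salaries else None,
--         'sample_size': len(salary_ranges)
--     }
-- ===== SOURCE B (Python) =====
-- def _aggregate_salary_data(salary_ranges):
--     """Aggregate salary data in a single pass with running accumulators."""
--     if not salary_ranges:
--         return {}
--     mn_cnt = 0; mn_sum = 0; mn_min = None
--     mx_cnt = 0; mx_sum = 0; mx_max = None
--     for s in salary_ranges:
--         if 'min' in s:
--             v = s['min']
--             mn_cnt += 1
--             mn_sum += v
--             mn_min = v if mn_min is None or v < mn_min else mn_min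
--         if 'max' in s:
--             v = s['max']
--             mx_cnt += 1
--             mx_sum += v
--             mx_max = v if mx_max is None or mx_max < v else mx_max
--     if mn_cnt == 0:
--         return {}
--     return {
--         'market_min': mn_min,
--         'market_max': mx_max,
--         'average_min': mn_sum // mn_cnt,
--         'average_max': mx_sum // mx_cnt if mx_cnt else None,
--         'sample_size': len(salary_ranges),
--     }
-- ===== Notes on version B (the rewrite author's own statement) =====
-- stated objective: alternative
-- what changed: Replaces the two list comprehensions plus separate min/max/sum/len passes with a single loop maintaining running count/sum/min/max accumulators; B also returns a dict with market_max=None instead of raising when no entry has a 'max' key.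
-- crash fix: When some entry has a 'min' key but no entry has a 'max' key, A raises ValueError from max([]) while B returns the aggregate dict with market_max and average_max set to None. — e.g. on _aggregate_salary_data([[("min", 1)]]): A raises ValueError, B returns [("market_min", some 1), ("market_max", none), ("average_min", some 1), ("average_max", none), ("sample_size", some 1)]
import Mathlib
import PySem

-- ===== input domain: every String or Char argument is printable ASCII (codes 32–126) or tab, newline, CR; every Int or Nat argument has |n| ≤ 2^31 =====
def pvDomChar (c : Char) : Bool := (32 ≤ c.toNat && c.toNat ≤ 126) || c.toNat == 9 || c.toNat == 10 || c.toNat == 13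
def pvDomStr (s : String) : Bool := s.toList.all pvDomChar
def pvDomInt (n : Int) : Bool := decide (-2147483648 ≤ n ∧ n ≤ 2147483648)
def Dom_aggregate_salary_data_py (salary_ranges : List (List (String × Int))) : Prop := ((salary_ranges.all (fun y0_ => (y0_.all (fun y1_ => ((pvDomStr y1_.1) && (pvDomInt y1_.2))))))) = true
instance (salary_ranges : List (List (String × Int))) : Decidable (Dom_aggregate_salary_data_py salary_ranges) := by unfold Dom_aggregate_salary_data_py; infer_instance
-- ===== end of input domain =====

-- B replaces A's two comprehensions and separate min/max/sum/len passes by one loop of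
-- running accumulators (objective: alternative, single pass); where A raises ValueError
-- (a 'min' key present but no 'max' key anywhere) B returns the dict with None fields.

-- first-match association-list lookup: Python "k in s" / "s[k]" on a dict
def pvGetK (s : List (String × Int)) (k : String) : Option Int :=
  (s.find? (fun p => p.1 == k)).map (·.2)

-- ===== PORT A =====
def aggregate_salary_data_py (salary_ranges : List (List (String × Int))) : List (String × Option Int) :=
  if salary_ranges = [] then []
  else
    let min_salaries := salary_ranges.filterMap (fun s => pvGetK s "min")
    let max_salaries := salary_ranges.filterMap (fun s => pvGetK s "max")
    if min_salaries = [] then []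
    else
      [("market_min", PySem.List.min? min_salaries (fun x => x)),
       ("market_max", PySem.List.max? max_salaries (fun x => x)),
       ("average_min", some (PySem.Int.floordiv min_salaries.sum (min_salaries.length : Int))),
       ("average_max", if max_salaries ≠ [] then some (PySem.Int.floordiv max_salaries.sum (max_salaries.length : Int)) else none),
       ("sample_size", some (salary_ranges.length : Int))]

-- ===== PORT B =====
-- one-pass accumulator step: (min count, min sum, running min, max count, max sum, running max)
def pvAltStep (st : Int × Int × Option Int × Int × Int × Option Int) (s : List (String × Int)) :
    Int × Int × Option Int × Int × Int × Option Int :=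
  let (mc, ms, mm, xc, xs, xm) := st
  let (mc, ms, mm) :=
    match pvGetK s "min" with
    | some v => (mc + 1, ms + v, some (match mm with | none => v | some m => if v < m then v else m))
    | none => (mc, ms, mm)
  let (xc, xs, xm) :=
    match pvGetK s "max" with
    | some v => (xc + 1, xs + v, some (match xm with | none => v | some m => if m < v then v else m))
    | none => (xc, xs, xm)
  (mc, ms, mm, xc, xs, xm)

def aggregate_salary_data_py_alt (salary_ranges : List (List (String × Int))) : List (String × Option Int) :=
  if salary_ranges = [] then []
  else
    let st := salary_ranges.foldl pvAltStep (0, 0, none, 0, 0, none)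
    let (mc, ms, mm, xc, xs, xm) := st
    if mc = 0 then []
    else
      [("market_min", mm),
       ("market_max", xm),
       ("average_min", some (PySem.Int.floordiv ms mc)),
       ("average_max", if xc ≠ 0 then some (PySem.Int.floordiv xs xc) else none),
       ("sample_size", some (salary_ranges.length : Int))]

-- ===== PRECONDITION & SPEC =====
-- Pre_ excludes exactly the inputs where A raises ValueError (max([]) on an empty
-- max list while min values exist); B returns a dict with None fields there.
def Pre_aggregate_salary_data_py (salary_ranges : List (List (String × Int))) : Prop :=
  (salary_ranges.any (fun s => (pvGetK s "min").isSome)) = true →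
  (salary_ranges.any (fun s => (pvGetK s "max").isSome)) = true
instance (salary_ranges : List (List (String × Int))) : Decidable (Pre_aggregate_salary_data_py salary_ranges) := by unfold Pre_aggregate_salary_data_py; infer_instance

def pvWitness_aggregate_salary_data_py : (List (List (String × Int))) := [[("min", 1), ("max", 5)], [("max", 3)]]

-- On inputs with some 'min' key but no 'max' key anywhere, A raises ValueError (max of
-- an empty list) while B returns the aggregate dict with market_max/average_max = None.
def Raises_aggregate_salary_data_py (salary_ranges : List (List (String × Int))) : Prop :=
  (salary_ranges.any (fun s => (pvGetK s "min").isSome)) = true ∧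
  (salary_ranges.any (fun s => (pvGetK s "max").isSome)) = false
instance (salary_ranges : List (List (String × Int))) : Decidable (Raises_aggregate_salary_data_py salary_ranges) := by unfold Raises_aggregate_salary_data_py; infer_instance

def pvRaiseWitness_aggregate_salary_data_py : (List (List (String × Int))) := [[("min", 1)]]
def pvRaiseWitnessOut_aggregate_salary_data_py : List (String × Option Int) :=
  [("market_min", some 1), ("market_max", none), ("average_min", some 1), ("average_max", none), ("sample_size", some 1)]

def Spec_aggregate_salary_data_py (salary_ranges : List (List (String × Int))) (out : List (String × Option Int)) : Prop := out = aggregate_salary_data_py_alt salary_ranges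
instance (salary_ranges : List (List (String × Int))) (out : List (String × Option Int)) : Decidable (Spec_aggregate_salary_data_py salary_ranges out) := by unfold Spec_aggregate_salary_data_py; infer_instance

-- ===== CLAIM (what is proved, stated in full; the proofs are below) =====
def Claim_equal_aggregate_salary_data_py : Prop := ∀ (salary_ranges : List (List (String × Int))), Dom_aggregate_salary_data_py salary_ranges → Pre_aggregate_salary_data_py salary_ranges → Spec_aggregate_salary_data_py salary_ranges (aggregate_salary_data_py salary_ranges)

def Claim_raises_aggregate_salary_data_py : Prop := (∀ (salary_ranges : List (List (String × Int))), Dom_aggregate_salary_data_py salary_ranges → Raises_aggregate_salary_data_py salary_ranges → ¬ Pre_aggregate_salary_data_py salary_ranges) ∧ (Dom_aggregate_salary_data_py (pvRaiseWitness_aggregate_salary_data_py) ∧ Raises_aggregate_salary_data_py (pvRaiseWitness_aggregate_salary_data_py) ∧ aggregate_salary_data_py_alt (pvRaiseWitness_aggregate_salary_data_py) = pvRaiseWitnessOut_aggregate_salary_data_py)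

-- ===== LEMMAS AND PROOFS =====

def pvMinStep (o : Option Int) (v : Int) : Option Int :=
  some (match o with | none => v | some m => if v < m then v else m)
def pvMaxStep (o : Option Int) (v : Int) : Option Int :=
  some (match o with | none => v | some m => if m < v then v else m)

theorem pvFold_eq (srs : List (List (String × Int)))
    (mc ms : Int) (mm : Option Int) (xc xs : Int) (xm : Option Int) :
    srs.foldl pvAltStep (mc, ms, mm, xc, xs, xm) =
      (mc + ((srs.filterMap (fun s => pvGetK s "min")).length : Int),
       ms + (srs.filterMap (fun s => pvGetK s "min")).sum,
       (srs.filterMap (fun s => pvGetK s "min")).foldl pvMinStep mm,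
       xc + ((srs.filterMap (fun s => pvGetK s "max")).length : Int),
       xs + (srs.filterMap (fun s => pvGetK s "max")).sum,
       (srs.filterMap (fun s => pvGetK s "max")).foldl pvMaxStep xm) := by
  induction srs generalizing mc ms mm xc xs xm with
  | nil => simp
  | cons h t ih =>
    simp only [List.foldl_cons, List.filterMap_cons]
    cases hmin : pvGetK h "min" <;> cases hmax : pvGetK h "max" <;>
      simp [pvAltStep, hmin, hmax, ih, pvMinStep, pvMaxStep] <;> push_cast <;> ring_nf <;> simp

theorem pvMinFold_eq (t : List Int) (x : Int) :
    t.foldl pvMinStep (some x) = some (t.foldl min x) := by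
  induction t generalizing x with
  | nil => rfl
  | cons h t ih =>
    have hmin : (if h < x then h else x) = min x h := by
      rw [min_def]; split_ifs <;> omega
    simp only [List.foldl_cons, pvMinStep, ih, hmin]

theorem pvMaxFold_eq (t : List Int) (x : Int) :
    t.foldl pvMaxStep (some x) = some (t.foldl max x) := by
  induction t generalizing x with
  | nil => rfl
  | cons h t ih =>
    have hmax : (if x < h then h else x) = max x h := by
      rw [max_def]; split_ifs <;> omega
    simp only [List.foldl_cons, pvMaxStep, ih, hmax]

theorem pvMinFold_min? (l : List Int) :
    l.foldl pvMinStep none = PySem.List.min? l (fun x => x) := by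
  cases l with
  | nil => rfl
  | cons x t =>
    rw [PySem.List.min?_id_cons]
    simpa [pvMinStep] using pvMinFold_eq t x

theorem pvMaxFold_max? (l : List Int) :
    l.foldl pvMaxStep none = PySem.List.max? l (fun x => x) := by
  cases l with
  | nil => rfl
  | cons x t =>
    rw [PySem.List.max?_id_cons]
    simpa [pvMaxStep] using pvMaxFold_eq t x

-- ===== VERDICT (by name: the statement is the Claim_ definition above) =====
theorem aggregate_salary_data_py_spec : Claim_equal_aggregate_salary_data_py := by
  intro srs _ _
  unfold Spec_aggregate_salary_data_py aggregate_salary_data_py aggregate_salary_data_py_alt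
  by_cases hnil : srs = []
  · simp [hnil]
  · simp only [hnil, if_false]
    rw [pvFold_eq]
    simp only [zero_add]
    set mins := srs.filterMap (fun s => pvGetK s "min") with hm
    set maxs := srs.filterMap (fun s => pvGetK s "max") with hx
    have hmc : ((mins.length : Int) = 0) ↔ mins = [] := by
      constructor
      · intro h; exact List.eq_nil_of_length_eq_zero (by exact_mod_cast h)
      · intro h; simp [h]
    have hxc : ((maxs.length : Int) ≠ 0) ↔ maxs ≠ [] := by
      constructor
      · intro h hxe; exact h (by simp [hxe])
      · intro h h0
        exact h (List.eq_nil_of_length_eq_zero (by exact_mod_cast h0))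
    by_cases hme : mins = []
    · simp [hme]
    · have : ¬ ((mins.length : Int) = 0) := fun h => hme (hmc.mp h)
      simp only [hme, if_false, this, if_false]
      rw [pvMinFold_min?, pvMaxFold_max?]
      by_cases hxe : maxs = [] <;> simp [hxe, hxc]

@[simp]
theorem aggregate_salary_data_py_raises : Claim_raises_aggregate_salary_data_py := by
  unfold Claim_raises_aggregate_salary_data_py
  refine ⟨?_, by decide⟩
  intro srs _ hr hp
  unfold Raises_aggregate_salary_data_py at hr
  unfold Pre_aggregate_salary_data_py at hp
  exact absurd (hp hr.1) (by simp [hr.2])
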